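-- pv_equiv track=rewrite | github.com/alex2awesome/public-comment-webpage | data/bulk_downloads/scripts/download_and_merge_content_files.py | normalized_prefix_key
-- ===== SOURCE A (Python) =====
-- def normalized_prefix_key(file_name: str) -> str:
--     """
--     Produce a normalized prefix identifier by stripping recognized suffixes (.pdf/.htm/.html/.txt)
--     so related files (different extensions) can be compared.
--     """
--
--     prefix = file_name.lower()
--     while True:
--         for suffix in (".txt", ".html", ".htm", ".pdf"):
--             if prefix.endswith(suffix):
--                 prefix = prefix[: -len(suffix)]
--                 break
--         else:
--             break
--     return prefix
-- ===== SOURCE B (Python) =====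
-- def normalized_prefix_key(file_name: str) -> str:
--     """
--     Produce a normalized prefix identifier by stripping recognized suffixes (.pdf/.htm/.html/.txt)
--     so related files (different extensions) can be compared.
--     """
--     parts = file_name.lower().split('.')
--     while len(parts) > 1 and parts[-1] in ('txt', 'html', 'htm', 'pdf'):
--         parts.pop()
--     return '.'.join(parts)
-- ===== Notes on version B (the rewrite author's own statement) =====
-- stated objective: simpler
-- what changed: B splits the lowercased name once on the dot separator into components, pops trailing components that are recognized extensions, and rejoins, instead of A's nested while/for loop that repeatedly tests endswith for each suffix and re-slices the string.
import Mathlib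
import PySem

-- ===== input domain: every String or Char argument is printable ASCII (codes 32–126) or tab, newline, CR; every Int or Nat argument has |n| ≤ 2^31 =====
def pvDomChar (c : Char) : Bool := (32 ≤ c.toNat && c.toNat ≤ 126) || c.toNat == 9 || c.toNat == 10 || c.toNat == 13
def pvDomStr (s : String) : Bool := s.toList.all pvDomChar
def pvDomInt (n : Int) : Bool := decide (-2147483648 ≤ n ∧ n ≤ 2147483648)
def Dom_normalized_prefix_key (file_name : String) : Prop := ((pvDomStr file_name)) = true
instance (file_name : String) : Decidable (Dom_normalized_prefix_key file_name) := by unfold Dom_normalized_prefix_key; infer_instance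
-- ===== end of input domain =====

-- B replaces A's repeated endswith-and-slice loop by split-on-'.'/pop-known-components/rejoin (simpler, one decomposition pass).


-- ===== PORT A =====
-- A's while/for loop: each pass strips the first matching suffix (prefix = prefix[:-len(suffix)]) and restarts.
def stripA (p : List Char) : List Char :=
  if h1 : PySem.Chars.endswith p ".txt".toList then
    stripA (PySem.List.slice p none (some (-4)))
  else if h2 : PySem.Chars.endswith p ".html".toList then
    stripA (PySem.List.slice p none (some (-5)))
  else if h3 : PySem.Chars.endswith p ".htm".toList then
    stripA (PySem.List.slice p none (some (-4)))
  else if h4 : PySem.Chars.endswith p ".pdf".toList then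
    stripA (PySem.List.slice p none (some (-4)))
  else p
termination_by p.length
decreasing_by
  all_goals
    first
      | (have hs := (PySem.Chars.endswith_iff _ _).mp h1
         have hl : 4 ≤ p.length := by simpa using hs.length_le
         rw [PySem.List.slice_to_neg_ofNat p 4 (by omega)]
         simp; omega)
      | (have hs := (PySem.Chars.endswith_iff _ _).mp h2
         have hl : 5 ≤ p.length := by simpa using hs.length_le
         rw [PySem.List.slice_to_neg_ofNat p 5 (by omega)]
         simp; omega)
      | (have hs := (PySem.Chars.endswith_iff _ _).mp h3
         have hl : 4 ≤ p.length := by simpa using hs.length_le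
         rw [PySem.List.slice_to_neg_ofNat p 4 (by omega)]
         simp; omega)
      | (have hs := (PySem.Chars.endswith_iff _ _).mp h4
         have hl : 4 ≤ p.length := by simpa using hs.length_le
         rw [PySem.List.slice_to_neg_ofNat p 4 (by omega)]
         simp; omega)

def normalized_prefix_key (file_name : String) : String :=
  String.mk (stripA (PySem.Chars.lower file_name.toList))

-- ===== PORT B =====
-- exact port of str.split('.') for the single-character separator '.'
def consHead (c : Char) : List (List Char) → List (List Char)
  | [] => [[c]]
  | p :: ps => (c :: p) :: ps

def splitDot : List Char → List (List Char)
  | [] => [[]]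
  | c :: rest => if c = '.' then [] :: splitDot rest else consHead c (splitDot rest)

def known (w : List Char) : Bool :=
  w == "txt".toList || w == "html".toList || w == "htm".toList || w == "pdf".toList

-- B's while loop: pop trailing recognized components
def popKnown (parts : List (List Char)) : List (List Char) :=
  if h1 : 1 < parts.length ∧ known (parts.getLastD []) then popKnown parts.dropLast else parts
termination_by parts.length
decreasing_by
  have := h1.1
  simp [List.length_dropLast]; omega

def normalized_prefix_key_alt (file_name : String) : String :=
  String.mk (PySem.Chars.join ['.'] (popKnown (splitDot (PySem.Chars.lower file_name.toList))))

-- ===== PRECONDITION & SPEC =====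
def Spec_normalized_prefix_key (file_name : String) (out : String) : Prop := out = normalized_prefix_key_alt file_name
instance (file_name : String) (out : String) : Decidable (Spec_normalized_prefix_key file_name out) := by unfold Spec_normalized_prefix_key; infer_instance

-- ===== CLAIM (what is proved, stated in full; the proofs are below) =====
def Claim_equal_normalized_prefix_key : Prop := ∀ (file_name : String), Dom_normalized_prefix_key file_name → Spec_normalized_prefix_key file_name (normalized_prefix_key file_name)

-- ===== LEMMAS AND PROOFS =====

theorem splitDot_ne_nil (l : List Char) : splitDot l ≠ [] := by
  induction l with
  | nil => simp [splitDot]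
  | cons c r ih =>
    simp only [splitDot]
    split
    · simp
    · cases h : splitDot r with
      | nil => exact absurd h ih
      | cons p ps => simp [consHead]

theorem splitDot_append_dot (a b : List Char) :
    splitDot (a ++ '.' :: b) = splitDot a ++ splitDot b := by
  induction a with
  | nil => simp [splitDot]
  | cons c r ih =>
    simp only [List.cons_append, splitDot, ih]
    split
    · rfl
    · cases h : splitDot r with
      | nil => exact absurd h (splitDot_ne_nil r)
      | cons p ps => simp [consHead]

theorem splitDot_no_dot (w : List Char) (hw : '.' ∉ w) : splitDot w = [w] := by
  induction w with
  | nil => rfl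
  | cons c r ih =>
    simp only [List.mem_cons, not_or] at hw
    have hc : ¬ c = '.' := fun h => hw.1 h.symm
    simp [splitDot, hc, ih hw.2, consHead]

theorem join_splitDot (l : List Char) : PySem.Chars.join ['.'] (splitDot l) = l := by
  induction l with
  | nil => simp [splitDot, PySem.Chars.join_singleton]
  | cons c r ih =>
    simp only [splitDot]
    split
    · rename_i hc
      cases h : splitDot r with
      | nil => exact absurd h (splitDot_ne_nil r)
      | cons p ps =>
        rw [PySem.Chars.join_cons_cons]
        rw [h] at ih
        simp [hc, ih]
    · cases h : splitDot r with
      | nil => exact absurd h (splitDot_ne_nil r)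
      | cons p ps =>
        rw [h] at ih
        cases ps with
        | nil =>
          simp only [consHead, PySem.Chars.join_singleton] at *
          simp [ih]
        | cons q qs =>
          simp only [consHead]
          rw [PySem.Chars.join_cons_cons] at ih ⊢
          simp [ih]

theorem join_concat (p : List (List Char)) (w : List Char) (hp : p ≠ []) :
    PySem.Chars.join ['.'] (p ++ [w]) = PySem.Chars.join ['.'] p ++ '.' :: w := by
  induction p with
  | nil => exact absurd rfl hp
  | cons x xs ih =>
    cases xs with
    | nil => simp [PySem.Chars.join_singleton, PySem.Chars.join_cons_cons]
    | cons y ys =>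
      have h1 : PySem.Chars.join ['.'] (x :: (y :: ys ++ [w]))
          = x ++ ['.'] ++ PySem.Chars.join ['.'] ((y :: ys) ++ [w]) :=
        PySem.Chars.join_cons_cons _ _ _ _
      rw [List.cons_append, h1, ih (by simp), PySem.Chars.join_cons_cons]
      simp

theorem pop_step (a w : List Char) (hk : known w = true) :
    popKnown (splitDot a ++ [w]) = popKnown (splitDot a) := by
  rw [popKnown]
  rw [dif_pos]
  · rw [List.dropLast_concat]
  · constructor
    · have := splitDot_ne_nil a
      have : 0 < (splitDot a).length := List.length_pos_of_ne_nil this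
      simp; omega
    · rwa [List.getLastD_concat]

theorem no_pop (l : List Char) (h : ∀ w, known w = true → ¬ ('.' :: w <:+ l)) :
    popKnown (splitDot l) = splitDot l := by
  rw [popKnown, dif_neg]
  rintro ⟨hlen, hk⟩
  set p := splitDot l with hp
  have hne : p ≠ [] := splitDot_ne_nil l
  have hdec : p.dropLast ++ [p.getLast hne] = p := List.dropLast_concat_getLast hne
  have hlast : p.getLastD [] = p.getLast hne := by
    conv_lhs => rw [← hdec]
    rw [List.getLastD_concat]
  rw [hlast] at hk
  have hdne : p.dropLast ≠ [] := by
    intro hnil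
    rw [hnil] at hdec
    have : p.length = 1 := by rw [← hdec]; rfl
    omega
  have hjoin : PySem.Chars.join ['.'] p = l := join_splitDot l
  rw [← hdec, join_concat _ _ hdne] at hjoin
  exact h _ hk ⟨_, hjoin⟩

theorem suffix_case (l a w : List Char) (hw : '.' ∉ w) (hk : known w = true)
    (hl : a ++ '.' :: w = l) :
    popKnown (splitDot l) = popKnown (splitDot a) := by
  rw [← hl, splitDot_append_dot, splitDot_no_dot w hw, pop_step a w hk]

theorem take_pref (l a w : List Char) (hl : a ++ '.' :: w = l) :
    l.take (l.length - (w.length + 1)) = a := by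
  subst hl
  have : (a ++ '.' :: w).length - (w.length + 1) = a.length := by simp
  rw [this]
  exact List.take_left

theorem stripA_eq (l : List Char) :
    stripA l = PySem.Chars.join ['.'] (popKnown (splitDot l)) := by
  generalize hn : l.length = n
  induction n using Nat.strong_induction_on generalizing l with
  | _ n ih =>
    rw [stripA]
    split
    · rename_i h1
      obtain ⟨a, ha⟩ := (PySem.Chars.endswith_iff _ _).mp h1
      have ha' : a ++ '.' :: ['t','x','t'] = l := ha
      rw [PySem.List.slice_to_neg_ofNat l 4 (by omega)]
      have ht : l.take (l.length - 4) = a := take_pref l a ['t','x','t'] ha'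
      rw [ht, suffix_case l a ['t','x','t'] (by decide) (by decide) ha']
      have hlen : a.length < n := by rw [← hn, ← ha']; simp
      exact ih a.length hlen a rfl
    split
    · rename_i h2
      obtain ⟨a, ha⟩ := (PySem.Chars.endswith_iff _ _).mp h2
      have ha' : a ++ '.' :: ['h','t','m','l'] = l := ha
      rw [PySem.List.slice_to_neg_ofNat l 5 (by omega)]
      have ht : l.take (l.length - 5) = a := take_pref l a ['h','t','m','l'] ha'
      rw [ht, suffix_case l a ['h','t','m','l'] (by decide) (by decide) ha']
      have hlen : a.length < n := by rw [← hn, ← ha']; simp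
      exact ih a.length hlen a rfl
    split
    · rename_i h3
      obtain ⟨a, ha⟩ := (PySem.Chars.endswith_iff _ _).mp h3
      have ha' : a ++ '.' :: ['h','t','m'] = l := ha
      rw [PySem.List.slice_to_neg_ofNat l 4 (by omega)]
      have ht : l.take (l.length - 4) = a := take_pref l a ['h','t','m'] ha'
      rw [ht, suffix_case l a ['h','t','m'] (by decide) (by decide) ha']
      have hlen : a.length < n := by rw [← hn, ← ha']; simp
      exact ih a.length hlen a rfl
    split
    · rename_i h4
      obtain ⟨a, ha⟩ := (PySem.Chars.endswith_iff _ _).mp h4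
      have ha' : a ++ '.' :: ['p','d','f'] = l := ha
      rw [PySem.List.slice_to_neg_ofNat l 4 (by omega)]
      have ht : l.take (l.length - 4) = a := take_pref l a ['p','d','f'] ha'
      rw [ht, suffix_case l a ['p','d','f'] (by decide) (by decide) ha']
      have hlen : a.length < n := by rw [← hn, ← ha']; simp
      exact ih a.length hlen a rfl
    · rename_i h1 h2 h3 h4
      rw [no_pop l ?_, join_splitDot]
      intro w hk hsuf
      simp only [known, Bool.or_eq_true, beq_iff_eq] at hk
      rcases hk with ((hw | hw) | hw) | hw <;> subst hw
      · exact h1 ((PySem.Chars.endswith_iff _ _).mpr hsuf)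
      · exact h2 ((PySem.Chars.endswith_iff _ _).mpr hsuf)
      · exact h3 ((PySem.Chars.endswith_iff _ _).mpr hsuf)
      · exact h4 ((PySem.Chars.endswith_iff _ _).mpr hsuf)

-- ===== VERDICT (by name: the statement is the Claim_ definition above) =====
theorem normalized_prefix_key_spec : Claim_equal_normalized_prefix_key := by
  intro file_name _
  unfold Spec_normalized_prefix_key normalized_prefix_key normalized_prefix_key_alt
  rw [stripA_eq]
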